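-- pv_equiv track=rewrite | github.com/gmaitland/CS_5001 | Homework_5/scratch_3.py | reverse_it
-- ===== SOURCE A (Python) =====
-- def reverse_it(song: list) -> list:
--     punctuation = ".?!:,"
--
--     # Convert the song list to a string and strip out punctuation
--     song_str = " ".join(song)
--     for char in punctuation:
--         song_str = song_str.replace(char, "")
--
--     # Reverse the words and update the song list
--     reversed_words = song_str.split()[::-1]
--     song[:] = reversed_words
--     return song
-- ===== SOURCE B (Python) =====
-- def reverse_it(song: list) -> list:
--     punctuation = ".?!:,"
--     out = []
--     for line in reversed(song):
--         word = ""
--         for c in reversed(line):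
--             if c in punctuation:
--                 continue
--             if c.isspace():
--                 if word:
--                     out.append(word)
--                     word = ""
--             else:
--                 word = c + word
--         if word:
--             out.append(word)
--     song[:] = out
--     return song
-- ===== Notes on version B (the rewrite author's own statement) =====
-- stated objective: alternative
-- what changed: A joins the list into one string, runs five str.replace passes, splits it and reverses the word list; B never joins, replaces or splits: it scans the elements back-to-front and each element's characters right-to-left with a one-word state machine (skip punctuation, flush the current word at whitespace, otherwise prepend the character), emitting the words directly in their final reversed order with no reversal pass.
import Mathlib
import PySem

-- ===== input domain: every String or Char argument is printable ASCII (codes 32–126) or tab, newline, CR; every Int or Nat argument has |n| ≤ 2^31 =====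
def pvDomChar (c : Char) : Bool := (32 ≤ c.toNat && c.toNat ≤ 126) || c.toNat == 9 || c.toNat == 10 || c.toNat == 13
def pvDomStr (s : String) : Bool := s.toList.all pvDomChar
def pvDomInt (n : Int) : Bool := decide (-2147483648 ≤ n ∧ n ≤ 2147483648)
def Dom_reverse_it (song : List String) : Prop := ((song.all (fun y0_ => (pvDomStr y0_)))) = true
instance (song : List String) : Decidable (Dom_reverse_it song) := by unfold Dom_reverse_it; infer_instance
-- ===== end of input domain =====

-- B replaces A's join / five-replace-passes / split / reverse pipeline with a single backward
-- scan (a one-word state machine over each element's characters, right-to-left) that emits the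
-- words directly in final order; both Pythons mutate `song` in place the same way (song[:] = …);
-- equality is proved on the return value.

-- ===== PORT A =====
def reverse_it (song : List String) : List String :=
  let punctuation : String := ".?!:,"
  -- song_str = " ".join(song); for char in punctuation: song_str = song_str.replace(char, "")
  let song_str : String := PySem.Str.join " " song
  let song_str : String :=
    punctuation.toList.foldl (fun s ch => PySem.Str.replace s (String.ofList [ch]) "") song_str
  -- reversed_words = song_str.split()[::-1]  ([::-1] ported as List.reverse, exact)
  let reversed_words := (PySem.Str.split₀ song_str).reverse
  reversed_words

-- ===== PORT B =====
-- inner loop body: skip punctuation; at whitespace flush the current word; else prepend the char.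
-- (Python keeps `word` as a str built by `c + word`; it is ported as the List Char of that str,
--  turned into a String exactly where Python appends it to `out` — exact on every input.
--  `c.isspace()` → PySem.Chars.isspace, exact on the stated ASCII domain.)
def pvStep (st : List Char × List String) (c : Char) : List Char × List String :=
  if (".?!:,".toList).contains c then st
  else if PySem.Chars.isspace c then
    if st.1.isEmpty then st else ([], st.2 ++ [String.ofList st.1])
  else (c :: st.1, st.2)

-- trailing `if word: out.append(word)` after a line's scan
def pvFlush (st : List Char × List String) : List String :=
  if st.1.isEmpty then st.2 else st.2 ++ [String.ofList st.1]

def reverse_it_alt (song : List String) : List String :=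
  -- out = []; for line in reversed(song): for c in reversed(line): …; song[:] = out
  song.reverse.foldl
    (fun out line => pvFlush (line.toList.reverse.foldl pvStep ([], out))) []

-- ===== PRECONDITION & SPEC =====
def Spec_reverse_it (song : List String) (out : List String) : Prop := out = reverse_it_alt song
instance (song : List String) (out : List String) : Decidable (Spec_reverse_it song out) := by unfold Spec_reverse_it; infer_instance

-- ===== CLAIM =====
def Claim_equal_reverse_it : Prop := ∀ (song : List String), Dom_reverse_it song → Spec_reverse_it song (reverse_it song)

-- ===== LEMMAS AND PROOFS =====

-- A's per-element cleaned string (proof helper only)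
def pvCleanLine (line : String) : String :=
  String.ofList (line.toList.filter (fun c => !((".?!:,".toList).contains c)))

-- split₀.go prepends its accumulator (reversed) to the result
theorem pv_go_acc (s : List Char) (cur : List Char) (acc : List (List Char)) :
    PySem.Chars.split₀.go s cur acc = acc.reverse ++ PySem.Chars.split₀.go s cur [] := by
  induction s generalizing cur acc with
  | nil => simp [PySem.Chars.split₀.go]; split_ifs <;> simp
  | cons c t ih =>
    simp only [PySem.Chars.split₀.go]
    split_ifs with h1 h2
    · exact ih [] acc
    · rw [ih [] (cur.reverse :: acc), ih [] [cur.reverse]]; simp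
    · exact ih (c :: cur) acc

-- splitting at an explicit whitespace character splits the pieces independently
theorem pv_go_space (sp : Char) (hsp : PySem.Chars.isspace sp = true)
    (xs ys : List Char) (cur : List Char) (acc : List (List Char)) :
    PySem.Chars.split₀.go (xs ++ sp :: ys) cur acc =
      PySem.Chars.split₀.go xs cur acc ++ PySem.Chars.split₀.go ys [] [] := by
  induction xs generalizing cur acc with
  | nil =>
    simp only [List.nil_append, PySem.Chars.split₀.go]
    rw [if_pos hsp]
    split_ifs with h
    · rw [pv_go_acc ys [] acc]
    · rw [pv_go_acc ys [] (cur.reverse :: acc)]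
  | cons c t ih =>
    simp only [List.cons_append, PySem.Chars.split₀.go]
    split_ifs with h1 h2
    · exact ih [] acc
    · exact ih [] (cur.reverse :: acc)
    · exact ih (c :: cur) acc

theorem pv_split₀_append_space (sp : Char) (hsp : PySem.Chars.isspace sp = true) (xs ys : List Char) :
    PySem.Chars.split₀ (xs ++ sp :: ys) =
      PySem.Chars.split₀ xs ++ PySem.Chars.split₀ ys := by
  simp only [PySem.Chars.split₀]
  exact pv_go_space sp hsp xs ys [] []

-- a list without whitespace splits into itself (or nothing, if empty)
theorem pv_go_nospace (w : List Char) (hw : w.all (fun c => !PySem.Chars.isspace c) = true)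
    (cur : List Char) (acc : List (List Char)) :
    PySem.Chars.split₀.go w cur acc =
      if (cur.reverse ++ w).isEmpty then acc.reverse
      else acc.reverse ++ [cur.reverse ++ w] := by
  induction w generalizing cur with
  | nil =>
    simp only [PySem.Chars.split₀.go, List.append_nil]
    split_ifs with h1 h2 h2 <;> simp_all
  | cons c t ih =>
    simp only [List.all_cons, Bool.and_eq_true, Bool.not_eq_true'] at hw
    simp only [PySem.Chars.split₀.go, hw.1, Bool.false_eq_true, if_false]
    rw [ih hw.2 (c :: cur)]
    simp

theorem pv_split₀_nospace (w : List Char) (hw : w.all (fun c => !PySem.Chars.isspace c) = true) :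
    PySem.Chars.split₀ w = if w.isEmpty then [] else [w] := by
  simp only [PySem.Chars.split₀]
  rw [pv_go_nospace w hw [] []]
  simp

-- split of a space-joined list is the concatenation of the splits
theorem pv_split₀_intercalate (parts : List (List Char)) :
    PySem.Chars.split₀ (List.intercalate [' '] parts) =
      parts.flatMap PySem.Chars.split₀ := by
  induction parts with
  | nil => simp [List.intercalate]; rfl
  | cons p rest ih =>
    cases rest with
    | nil => simp [List.intercalate]
    | cons q l =>
      have : List.intercalate [' '] (p :: q :: l) = p ++ ' ' :: List.intercalate [' '] (q :: l) := by
        simp [List.intercalate]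
      rw [this, pv_split₀_append_space ' ' (by decide), ih]
      simp

-- replacing a single character by "" is filtering it out (go level, with enough fuel)
theorem pv_replace_go_single (c : Char) (fuel : Nat) (l : List Char) (acc : List Char)
    (h : l.length ≤ fuel) :
    PySem.Chars.replace.go [c] [] fuel l acc =
      acc.reverse ++ l.filter (fun x => !(x == c)) := by
  induction fuel generalizing l acc with
  | zero =>
    have : l = [] := by cases l <;> simp_all
    subst this; simp [PySem.Chars.replace.go]
  | succ n ih =>
    cases l with
    | nil => simp [PySem.Chars.replace.go]
    | cons x t =>
      simp only [PySem.Chars.replace.go]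
      by_cases hx : x = c
      · subst hx
        have hpre : [x].isPrefixOf (x :: t) = true := by simp [List.isPrefixOf]
        rw [if_pos hpre]
        simp only [List.length, List.drop_succ_cons, List.drop_zero, List.reverse_nil,
          List.nil_append]
        rw [ih t acc (by simpa using Nat.le_of_succ_le_succ (by simpa using h))]
        simp
      · have hpre : [c].isPrefixOf (x :: t) = false := by
          simp [List.isPrefixOf]; exact fun hxc => (hx hxc.symm).elim
        rw [if_neg (by simp [hpre])]
        rw [ih t (x :: acc) (by simpa using Nat.le_of_succ_le_succ (by simpa using h))]
        simp [hx]

theorem pv_replace_single (s : List Char) (c : Char) :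
    PySem.Chars.replace s [c] [] = s.filter (fun x => !(x == c)) := by
  simp only [PySem.Chars.replace]
  rw [if_neg (by simp), pv_replace_go_single c s.length s [] (le_refl _)]
  simp

-- a filter that keeps ' ' commutes with space-intercalation
theorem pv_filter_intercalate (p : Char → Bool) (hp : p ' ' = true) (parts : List (List Char)) :
    (List.intercalate [' '] parts).filter p =
      List.intercalate [' '] (parts.map (List.filter p)) := by
  induction parts with
  | nil => simp [List.intercalate]
  | cons a rest ih =>
    cases rest with
    | nil => simp [List.intercalate]
    | cons b l =>
      have h1 : List.intercalate [' '] (a :: b :: l) = a ++ ' ' :: List.intercalate [' '] (b :: l) := by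
        simp [List.intercalate]
      have h2 : List.intercalate [' '] ((a :: b :: l).map (List.filter p)) =
          a.filter p ++ ' ' :: List.intercalate [' '] ((b :: l).map (List.filter p)) := by
        simp [List.intercalate]
      rw [h1, h2, List.filter_append, ← ih]
      simp [hp]

-- A's five successive replaces equal a one-pass punctuation filter
theorem pv_replaces_eq_filter (cs : List Char) :
    (".?!:,".toList.foldl (fun s ch => PySem.Chars.replace s [ch] []) cs) =
      cs.filter (fun c => !((".?!:,".toList).contains c)) := by
  have hl : ".?!:,".toList = ['.', '?', '!', ':', ','] := by decide
  rw [hl]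
  simp only [List.foldl_cons, List.foldl_nil, pv_replace_single, List.filter_filter]
  apply List.filter_congr
  intro c _
  by_cases h1 : c = '.' <;> by_cases h2 : c = '?' <;> by_cases h3 : c = '!' <;>
    by_cases h4 : c = ':' <;> by_cases h5 : c = ',' <;> simp_all

-- the replace loop on Strings, seen through toList, is the replace loop on char lists
theorem pv_fold_replace_toList (chs : List Char) (s : String) :
    (chs.foldl (fun s ch => PySem.Str.replace s (String.ofList [ch]) "") s).toList =
      chs.foldl (fun cs ch => PySem.Chars.replace cs [ch] []) s.toList := by
  induction chs generalizing s with
  | nil => rfl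
  | cons ch t ih =>
    simp only [List.foldl_cons, ih]
    congr 1
    simp

-- the word list A computes equals the concatenation of the per-element splits (String level)
theorem pv_core (song : List String) :
    PySem.Str.split₀
      (".?!:,".toList.foldl (fun s ch => PySem.Str.replace s (String.ofList [ch]) "")
        (PySem.Str.join " " song)) =
      song.flatMap (fun line => PySem.Str.split₀ (pvCleanLine line)) := by
  apply List.map_injective_iff.mpr (fun a b h => String.toList_injective h)
  rw [List.map_flatMap]
  simp only [PySem.Str.split₀_map_toList]
  rw [pv_fold_replace_toList, pv_replaces_eq_filter]
  have hjoin : (PySem.Str.join " " song).toList =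
      List.intercalate [' '] (song.map String.toList) := by
    simp [PySem.Chars.join]
  rw [hjoin, pv_filter_intercalate _ (by decide), pv_split₀_intercalate]
  simp [pvCleanLine, List.flatMap_map, Function.comp]

-- THE SCANNER INVARIANT: B's backward state machine over rs (the reversed chars), started with a
-- whitespace-free current word w, emits exactly the reversed word-split of the punctuation-filtered
-- original text (rs reversed, followed by w).
theorem pv_scan (rs : List Char) : ∀ (w : List Char) (out : List String),
    w.all (fun c => !PySem.Chars.isspace c) = true →
    pvFlush (rs.foldl pvStep (w, out)) =
      out ++ ((PySem.Chars.split₀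
        ((rs.filter (fun c => !((".?!:,".toList).contains c))).reverse ++ w)).reverse).map
          String.ofList := by
  induction rs with
  | nil =>
    intro w out hw
    simp only [List.foldl_nil, List.filter_nil, List.reverse_nil, List.nil_append]
    rw [pv_split₀_nospace w hw]
    cases w <;> simp [pvFlush]
  | cons c t ih =>
    intro w out hw
    simp only [List.foldl_cons, pvStep]
    by_cases hc : (".?!:,".toList).contains c
    · have hfilter : (c :: t).filter (fun c => !((".?!:,".toList).contains c)) =
          t.filter (fun c => !((".?!:,".toList).contains c)) := by
        simp only [List.filter_cons, hc, Bool.not_true, Bool.false_eq_true, if_false]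
      rw [if_pos hc, hfilter, ih w out hw]
    · rw [if_neg hc]
      by_cases hsp : PySem.Chars.isspace c
      · rw [if_pos hsp]
        have hsplit : PySem.Chars.split₀
            ((t.filter (fun c => !((".?!:,".toList).contains c))).reverse ++ c :: w) =
            PySem.Chars.split₀ (t.filter (fun c => !((".?!:,".toList).contains c))).reverse ++
              PySem.Chars.split₀ w :=
          pv_split₀_append_space c hsp _ w
        have hfilter : (c :: t).filter (fun c => !((".?!:,".toList).contains c)) =
            c :: t.filter (fun c => !((".?!:,".toList).contains c)) := by
          rw [List.filter_cons_of_pos (by simp only [Bool.not_eq_true']; exact Bool.eq_false_iff.mpr hc)]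
        by_cases hwe : w = []
        · subst hwe
          simp only [List.isEmpty_nil, if_true]
          rw [ih [] out (by simp)]
          rw [hfilter]
          simp only [List.reverse_cons, List.append_assoc, List.singleton_append]
          rw [hsplit]
          simp [PySem.Chars.split₀, PySem.Chars.split₀.go]
        · have hwne : w.isEmpty = false := by simp [hwe]
          simp only [hwne, Bool.false_eq_true, if_false]
          rw [ih [] (out ++ [String.ofList w]) (by simp)]
          rw [hfilter]
          simp only [List.reverse_cons, List.append_assoc, List.singleton_append]
          rw [hsplit, pv_split₀_nospace w hw]
          simp [hwne]
      · rw [if_neg hsp]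
        have hwc : (c :: w).all (fun c => !PySem.Chars.isspace c) = true := by
          simp_all
        rw [ih (c :: w) out hwc]
        have hfilter : (c :: t).filter (fun c => !((".?!:,".toList).contains c)) =
            c :: t.filter (fun c => !((".?!:,".toList).contains c)) := by
          rw [List.filter_cons_of_pos (by simp only [Bool.not_eq_true']; exact Bool.eq_false_iff.mpr hc)]
        rw [hfilter]
        simp [List.append_assoc]

-- per element: one line's scan appends that line's words, reversed
theorem pv_line (out : List String) (line : String) :
    pvFlush (line.toList.reverse.foldl pvStep ([], out)) =
      out ++ ((PySem.Chars.split₀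
        (line.toList.filter (fun c => !((".?!:,".toList).contains c)))).reverse).map
          String.ofList := by
  rw [pv_scan _ [] out (by simp)]
  simp [List.filter_reverse]

-- ===== VERDICT (by name: the statement is the Claim_ definition above) =====
theorem reverse_it_spec : Claim_equal_reverse_it := by
  intro song _
  unfold Spec_reverse_it reverse_it reverse_it_alt
  simp only []
  have hB : song.reverse.foldl
      (fun out line => pvFlush (line.toList.reverse.foldl pvStep ([], out))) [] =
      song.reverse.flatMap (fun line =>
        ((PySem.Chars.split₀
          (line.toList.filter (fun c => !((".?!:,".toList).contains c)))).reverse).map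
            String.ofList) := by
    have := PySem.List.foldl_append_eq_flatMap (fun line =>
        ((PySem.Chars.split₀
          (line.toList.filter (fun c => !((".?!:,".toList).contains c)))).reverse).map
            String.ofList) song.reverse []
    rw [List.nil_append] at this
    rw [← this]
    apply PySem.List.foldl_congr_mem
    intro out line _
    exact pv_line out line
  rw [hB, pv_core, List.reverse_flatMap]
  apply List.flatMap_congr
  intro line _
  simp [PySem.Str.split₀, pvCleanLine, Function.comp]
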